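-- pv_equiv track=rewrite | github.com/qsantos/advent-of-code | 2016/day15/main.py | when_to_press_the_button
-- ===== SOURCE A (Python) =====
-- from typing import List, Tuple
--
-- def crt(remainders: List[int], modulos: List[int]) -> int:
--     assert len(remainders) == len(modulos)
--     N = 1
--     for modulo in modulos:
--         N *= modulo
--     x = 0
--     for ai, ni in zip(remainders, modulos):
--         Ni = N // ni
--         Mi = pow(Ni, -1, ni)
--         x += ai * Ni * Mi
--         x %= N
--     return x
--
-- def when_to_press_the_button(discs: List[Tuple[int, int]]) -> int:
--     # we want to t such that:
--     # all((start + i + 1 + t) % n_pos == 0 for i, (n_pos, start) in enumerate(discs))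
--     # so we want t == - (start + i + 1) mod n_pos for each i, (n_pos, start) in enumerate(discs)
--     remainders = []
--     modulos = []
--     for i, (n_pos, start) in enumerate(discs):
--         remainders.append(- (start + i + 1))
--         modulos.append(n_pos)
--     t = crt(remainders, modulos)
--     assert all((start + i + 1 + t) % n_pos == 0 for i, (n_pos, start) in enumerate(discs))
--     return t
-- ===== SOURCE B (Python) =====
-- from typing import List, Tuple
--
-- def when_to_press_the_button(discs: List[Tuple[int, int]]) -> int:
--     # Merge the congruences t == -(start + i + 1) (mod n_pos) two at a time:
--     # (r, m) always satisfies t == r (mod m) for the discs seen so far.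
--     r, m = 0, 1
--     for i, (n_pos, start) in enumerate(discs):
--         ai = -(start + i + 1)
--         t = ((ai - r) * pow(m, -1, n_pos)) % n_pos
--         r, m = r + m * t, m * n_pos
--     return r % m
-- ===== Notes on version B (the rewrite author's own statement) =====
-- stated objective: simpler
-- what changed: Replaces the global-product CRT helper (compute N, divide N//ni, invert N//ni mod ni, sum ai*Ni*Mi) and the separate remainder/modulus list-building pass by a single loop that merges two congruences at a time with a running (residue, modulus) accumulator, never dividing and never materialising the lists.
import Mathlib
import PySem

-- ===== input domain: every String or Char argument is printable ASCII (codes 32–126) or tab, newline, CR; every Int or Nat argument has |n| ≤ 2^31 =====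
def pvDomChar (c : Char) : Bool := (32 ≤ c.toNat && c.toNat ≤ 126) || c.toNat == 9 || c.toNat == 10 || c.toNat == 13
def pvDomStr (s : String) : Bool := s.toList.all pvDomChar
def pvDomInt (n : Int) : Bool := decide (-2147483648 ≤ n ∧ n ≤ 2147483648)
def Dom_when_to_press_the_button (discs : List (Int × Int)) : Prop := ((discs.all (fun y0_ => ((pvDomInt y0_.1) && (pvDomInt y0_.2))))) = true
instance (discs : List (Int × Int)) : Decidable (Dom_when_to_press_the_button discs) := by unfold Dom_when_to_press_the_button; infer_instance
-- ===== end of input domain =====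

-- B replaces A's global-product CRT helper by a single pairwise congruence-merging fold (simpler; same cost).


-- ===== PORT A =====
-- pow(x, -1, n): modular inverse via the extended Euclidean coefficient, reduced into
-- Python's canonical range by PySem.Int.mod; exact whenever Int.gcd x n = 1 and n ≠ 0
-- (guaranteed inside Pre_; on other inputs Python's pow raises and Pre_ excludes them).
def pyInvMod (x n : Int) : Int := PySem.Int.mod (Int.gcdA x n) n

def crt (remainders modulos : List Int) : Int :=
  -- assert len(remainders) == len(modulos): always true at the call site
  let N := modulos.foldl (fun acc m => acc * m) 1
  (remainders.zip modulos).foldl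
    (fun x p =>
      let Ni := PySem.Int.floordiv N p.2
      let Mi := pyInvMod Ni p.2
      PySem.Int.mod (x + p.1 * Ni * Mi) N) 0

def when_to_press_the_button (discs : List (Int × Int)) : Int :=
  let rm := (PySem.List.enumerate discs).foldl
    (fun (acc : List Int × List Int) ip =>
      (acc.1 ++ [-(ip.2.2 + ip.1 + 1)], acc.2 ++ [ip.2.1])) ([], [])
  -- the final assert holds on every input on which the pow calls succeed
  crt rm.1 rm.2

-- ===== PORT B =====
def when_to_press_the_button_alt (discs : List (Int × Int)) : Int :=
  let rm := (PySem.List.enumerate discs).foldl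
    (fun (rm : Int × Int) ip =>
      let ai := -(ip.2.2 + ip.1 + 1)
      let t := PySem.Int.mod ((ai - rm.1) * pyInvMod rm.2 ip.2.1) ip.2.1
      (rm.1 + rm.2 * t, rm.2 * ip.2.1)) (0, 1)
  PySem.Int.mod rm.1 rm.2

-- ===== PRECONDITION & SPEC =====
-- Pre_ excludes exactly the inputs on which Python A raises: a zero disc size
-- (ZeroDivisionError) or two disc sizes with a common factor (ValueError from pow).
def Pre_when_to_press_the_button (discs : List (Int × Int)) : Prop :=
  (∀ p ∈ discs, p.1 ≠ 0) ∧ discs.Pairwise (fun p q => Int.gcd p.1 q.1 = 1)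
instance (discs : List (Int × Int)) : Decidable (Pre_when_to_press_the_button discs) := by unfold Pre_when_to_press_the_button; infer_instance

def pvWitness_when_to_press_the_button : (List (Int × Int)) := [(5, 4), (2, 1)]

def Spec_when_to_press_the_button (discs : List (Int × Int)) (out : Int) : Prop := out = when_to_press_the_button_alt discs
instance (discs : List (Int × Int)) (out : Int) : Decidable (Spec_when_to_press_the_button discs out) := by unfold Spec_when_to_press_the_button; infer_instance

-- ===== CLAIM (what is proved, stated in full; the proofs are below) =====
def Claim_equal_when_to_press_the_button : Prop := ∀ (discs : List (Int × Int)), Dom_when_to_press_the_button discs → Pre_when_to_press_the_button discs → Spec_when_to_press_the_button discs (when_to_press_the_button discs)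

-- ===== LEMMAS AND PROOFS =====

-- the (remainder, modulus) pair list both programs effectively iterate over
def pvPairs (discs : List (Int × Int)) : List (Int × Int) :=
  (PySem.List.enumerate discs).map (fun ip => (-(ip.2.2 + ip.1 + 1), ip.2.1))

def pvN (ds : List (Int × Int)) : Int := (ds.map Prod.snd).prod

def pvStepA (N : Int) (x : Int) (p : Int × Int) : Int :=
  PySem.Int.mod (x + p.1 * (PySem.Int.floordiv N p.2) * pyInvMod (PySem.Int.floordiv N p.2) p.2) N

def pvStepB (rm : Int × Int) (p : Int × Int) : Int × Int :=
  (rm.1 + rm.2 * PySem.Int.mod ((p.1 - rm.1) * pyInvMod rm.2 p.2) p.2, rm.2 * p.2)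

-- Python % is congruent to its argument
lemma pv_dvd_sub_fmod (a b : Int) : b ∣ a - PySem.Int.mod a b := by
  simpa [PySem.Int.mod] using Int.dvd_self_sub_fmod (x := a) (m := b)

lemma pv_fmod_eq_of_dvd_sub (a b N : Int) (h : N ∣ a - b) : PySem.Int.mod a N = PySem.Int.mod b N := by
  obtain ⟨k, hk⟩ := h
  have ha : a = b + N * k := by linarith
  show Int.fmod a N = Int.fmod b N
  rw [ha, Int.add_mul_fmod_self_left]

lemma pv_coprime_list_prod (a : Int) (l : List Int) (h : ∀ b ∈ l, IsCoprime a b) :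
    IsCoprime a l.prod := by
  induction l with
  | nil => simpa using isCoprime_one_right
  | cons b t ih =>
    simp only [List.prod_cons]
    exact IsCoprime.mul_right (h b (by simp)) (ih (fun c hc => h c (by simp [hc])))

-- modular-inverse property of pyInvMod
lemma pv_invMod_spec (x n : Int) (h : IsCoprime x n) : n ∣ x * pyInvMod x n - 1 := by
  have hg : Int.gcd x n = 1 := Int.isCoprime_iff_gcd_eq_one.mp h
  have hab := Int.gcd_eq_gcd_ab x n
  rw [hg] at hab
  have h1 : n ∣ x * Int.gcdA x n - 1 := ⟨-Int.gcdB x n, by push_cast at hab; linarith⟩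
  have h2 : n ∣ x * (pyInvMod x n - Int.gcdA x n) := by
    refine Dvd.dvd.mul_left ?_ x
    have := pv_dvd_sub_fmod (Int.gcdA x n) n
    simpa [pyInvMod] using (dvd_neg.mpr this)
  have := dvd_add h2 h1
  convert this using 1
  ring

lemma pv_cop_dvd (ds : List (Int × Int)) (hcop : ds.Pairwise (fun p q => Int.gcd p.2 q.2 = 1))
    (x y : Int) (hx : ∀ q ∈ ds, q.2 ∣ x - q.1) (hy : ∀ q ∈ ds, q.2 ∣ y - q.1) :
    pvN ds ∣ x - y := by
  induction ds with
  | nil => simp [pvN]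
  | cons p t ih =>
    rw [List.pairwise_cons] at hcop
    have hp : p.2 ∣ x - y := by
      have := dvd_sub (hx p (by simp)) (hy p (by simp))
      simpa using this
    have ht : pvN t ∣ x - y :=
      ih hcop.2 (fun q hq => hx q (by simp [hq])) (fun q hq => hy q (by simp [hq]))
    have hcopr : IsCoprime p.2 (pvN t) := by
      apply pv_coprime_list_prod
      intro b hb
      obtain ⟨q, hq, rfl⟩ := List.mem_map.mp hb
      exact Int.isCoprime_iff_gcd_eq_one.mpr (hcop.1 q hq)
    have : pvN (p :: t) = p.2 * pvN t := by simp [pvN]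
    rw [this]
    exact IsCoprime.mul_dvd hcopr hp ht

-- A-side invariant
lemma pv_A_inv (full : List (Int × Int)) (h0 : ∀ p ∈ full, p.2 ≠ 0)
    (hcop : full.Pairwise (fun p q => Int.gcd p.2 q.2 = 1)) :
    ∀ todo done x, full = done ++ todo →
      (∀ q ∈ done, q.2 ∣ x - q.1) → (∀ p ∈ todo, p.2 ∣ x) →
      ∀ q ∈ full, q.2 ∣ (todo.foldl (pvStepA (pvN full)) x) - q.1 := by
  intro todo
  induction todo with
  | nil =>
    intro done x hsplit hdone _
    simpa using fun q hq => hdone q (by simpa [hsplit] using hq)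
  | cons p rest ih =>
    intro done x hsplit hdone htodo
    have hpfull : p ∈ full := by simp [hsplit]
    have hp0 : p.2 ≠ 0 := h0 p hpfull
    -- the fixed modulus N and this step's quantities
    set N := pvN full with hN
    set Ni := PySem.Int.floordiv N p.2 with hNi
    set Mi := pyInvMod Ni p.2 with hMi
    -- (f1) every modulus divides N
    have f1 : ∀ q ∈ full, q.2 ∣ N := by
      intro q hq
      exact List.dvd_prod (List.mem_map.mpr ⟨q, hq, rfl⟩)
    -- (f2)/(f3): Ni is the product of the other moduli
    have f2 : N = p.2 * ((done ++ rest).map Prod.snd).prod := by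
      simp only [hN, pvN, hsplit, List.map_append, List.prod_append, List.map_cons,
        List.prod_cons]
      ring
    have f3 : Ni = ((done ++ rest).map Prod.snd).prod := by
      rw [hNi, f2]
      show Int.fdiv _ _ = _
      exact Int.mul_fdiv_cancel_left _ hp0
    -- (f4) the other moduli divide Ni
    have f4 : ∀ q ∈ done ++ rest, q.2 ∣ Ni := by
      intro q hq
      rw [f3]
      exact List.dvd_prod (List.mem_map.mpr ⟨q, hq, rfl⟩)
    -- pairwise facts around p
    rw [hsplit] at hcop
    rw [List.pairwise_append] at hcop
    have hcons := hcop.2.1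
    rw [List.pairwise_cons] at hcons
    -- (f5) Ni is coprime to p.2
    have f5 : IsCoprime Ni p.2 := by
      rw [f3]
      refine (pv_coprime_list_prod p.2 _ ?_).symm
      intro b hb
      obtain ⟨q, hq, rfl⟩ := List.mem_map.mp hb
      rcases List.mem_append.mp hq with hq | hq
      · exact (Int.isCoprime_iff_gcd_eq_one.mpr (hcop.2.2 q hq p (by simp))).symm
      · exact Int.isCoprime_iff_gcd_eq_one.mpr (Int.gcd_comm p.2 q.2 ▸ hcons.1 q hq)
    -- (f6) Ni * Mi ≡ 1 (mod p.2)
    have f6 : p.2 ∣ Ni * Mi - 1 := pv_invMod_spec Ni p.2 f5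
    -- the step value
    set c : Int := p.1 * Ni * Mi with hc
    set x' : Int := PySem.Int.mod (x + c) N with hx'
    have hstep : pvStepA N x p = x' := rfl
    -- (g1) x' differs from x + c by a multiple of every modulus
    have g1 : ∀ q ∈ full, q.2 ∣ x' - (x + c) := by
      intro q hq
      have := pv_dvd_sub_fmod (x + c) N
      have hN' : q.2 ∣ (x + c) - x' := dvd_trans (f1 q hq) this
      simpa using dvd_neg.mpr hN'
    -- invariant for the extended done list
    have hdone' : ∀ q ∈ done ++ [p], q.2 ∣ x' - q.1 := by
      intro q hq
      rcases List.mem_append.mp hq with hq | hq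
      · have h1 : q.2 ∣ x' - (x + c) := g1 q (by simp [hsplit, hq])
        have h2 : q.2 ∣ x - q.1 := hdone q hq
        have h3 : q.2 ∣ c := by
          have := f4 q (by simp [hq])
          have hd : q.2 ∣ p.1 * Ni * Mi := Dvd.dvd.mul_right (Dvd.dvd.mul_left this p.1) Mi
          simpa [hc] using hd
        have := dvd_add (dvd_add h1 h2) h3
        convert this using 1
        ring
      · have hq' : q = p := by simpa using hq
        subst hq'
        have h1 : q.2 ∣ x' - (x + c) := g1 q hpfull
        have h2 : q.2 ∣ x := htodo q (by simp)
        have h3 : q.2 ∣ q.1 * (Ni * Mi - 1) := Dvd.dvd.mul_left f6 q.1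
        have := dvd_add (dvd_add h1 h2) h3
        convert this using 1
        simp only [hc]
        ring
    -- invariant for the remaining moduli
    have htodo' : ∀ p' ∈ rest, p'.2 ∣ x' := by
      intro p' hp'
      have h1 : p'.2 ∣ x' - (x + c) := g1 p' (by simp [hsplit, hp'])
      have h2 : p'.2 ∣ x := htodo p' (by simp [hp'])
      have h3 : p'.2 ∣ c := by
        have := f4 p' (by simp [hp'])
        have hd : p'.2 ∣ p.1 * Ni * Mi := Dvd.dvd.mul_right (Dvd.dvd.mul_left this p.1) Mi
        simpa [hc] using hd
      have := dvd_add (dvd_add h1 h2) h3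
      convert this using 1
      ring
    have hsplit' : full = (done ++ [p]) ++ rest := by simp [hsplit]
    have hc2 : full.Pairwise (fun p q => Int.gcd p.2 q.2 = 1) := by
      rw [hsplit]
      rw [List.pairwise_append]
      exact hcop
    simpa only [List.foldl_cons, hstep] using ih (done ++ [p]) x' hsplit' hdone' htodo'

-- the A fold over a nonempty list ends in a mod-N value
lemma pv_A_fmod (N : Int) : ∀ (l : List (Int × Int)) (x : Int), l ≠ [] →
    ∃ s, l.foldl (pvStepA N) x = PySem.Int.mod s N := by
  intro l
  induction l with
  | nil => intro x h; exact absurd rfl h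
  | cons p rest ih =>
    intro x _
    cases rest with
    | nil => exact ⟨_, rfl⟩
    | cons q t => simpa only [List.foldl_cons] using ih (pvStepA N x p) (by simp)

-- B-side invariant
lemma pv_B_inv (full : List (Int × Int))
    (hcop : full.Pairwise (fun p q => Int.gcd p.2 q.2 = 1)) :
    ∀ todo done r m, full = done ++ todo →
      m = (done.map Prod.snd).prod → (∀ q ∈ done, q.2 ∣ r - q.1) →
      (todo.foldl pvStepB (r, m)).2 = pvN full ∧
      ∀ q ∈ full, q.2 ∣ (todo.foldl pvStepB (r, m)).1 - q.1 := by
  intro todo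
  induction todo with
  | nil =>
    intro done r m hsplit hm hdone
    constructor
    · simp [pvN, hsplit, hm]
    · simpa using fun q hq => hdone q (by simpa [hsplit] using hq)
  | cons p rest ih =>
    intro done r m hsplit hm hdone
    -- pairwise facts around p
    have hcop' := hcop
    rw [hsplit, List.pairwise_append] at hcop'
    -- m is coprime to p.2
    have b5 : IsCoprime m p.2 := by
      rw [hm]
      refine (pv_coprime_list_prod p.2 _ ?_).symm
      intro b hb
      obtain ⟨q, hq, rfl⟩ := List.mem_map.mp hb
      exact (Int.isCoprime_iff_gcd_eq_one.mpr (hcop'.2.2 q hq p (by simp))).symm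
    have b6 : p.2 ∣ m * pyInvMod m p.2 - 1 := pv_invMod_spec m p.2 b5
    set t : Int := PySem.Int.mod ((p.1 - r) * pyInvMod m p.2) p.2 with ht
    set r' : Int := r + m * t with hr'
    have hstep : pvStepB (r, m) p = (r', m * p.2) := rfl
    have hdone' : ∀ q ∈ done ++ [p], q.2 ∣ r' - q.1 := by
      intro q hq
      rcases List.mem_append.mp hq with hq | hq
      · have h1 : q.2 ∣ r - q.1 := hdone q hq
        have h2 : q.2 ∣ m := by
          rw [hm]; exact List.dvd_prod (List.mem_map.mpr ⟨q, hq, rfl⟩)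
        have := dvd_add h1 (Dvd.dvd.mul_right h2 t)
        convert this using 1
        rw [hr']; ring
      · have hq' : q = p := by simpa using hq
        subst hq'
        have h1 : q.2 ∣ t - (q.1 - r) * pyInvMod m q.2 := by
          have := pv_dvd_sub_fmod ((q.1 - r) * pyInvMod m q.2) q.2
          simpa [ht] using dvd_neg.mpr this
        have h2 : q.2 ∣ m * (t - (q.1 - r) * pyInvMod m q.2) := Dvd.dvd.mul_left h1 m
        have h3 : q.2 ∣ (q.1 - r) * (m * pyInvMod m q.2 - 1) := Dvd.dvd.mul_left b6 _
        have := dvd_add h2 h3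
        convert this using 1
        rw [hr']; ring
    have hsplit' : full = (done ++ [p]) ++ rest := by simp [hsplit]
    have hm' : m * p.2 = ((done ++ [p]).map Prod.snd).prod := by
      simp [hm]
    simpa only [List.foldl_cons, hstep] using ih (done ++ [p]) r' (m * p.2) hsplit' hm' hdone'

-- core equivalence on the pair list
lemma pv_crt_eq (ds : List (Int × Int)) (h0 : ∀ p ∈ ds, p.2 ≠ 0)
    (hcop : ds.Pairwise (fun p q => Int.gcd p.2 q.2 = 1)) :
    ds.foldl (pvStepA (pvN ds)) 0 =
      PySem.Int.mod (ds.foldl pvStepB (0, 1)).1 (ds.foldl pvStepB (0, 1)).2 := by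
  cases hds : ds with
  | nil => simp [PySem.Int.mod]
  | cons p t =>
    rw [← hds]
    have hne : ds ≠ [] := by simp [hds]
    have hA_sat := pv_A_inv ds h0 hcop ds [] 0 rfl (by simp) (fun p _ => dvd_zero _)
    obtain ⟨s, hs⟩ := pv_A_fmod (pvN ds) ds 0 hne
    have hB := pv_B_inv ds hcop ds [] 0 1 rfl (by simp) (by simp)
    have hd : pvN ds ∣ (ds.foldl (pvStepA (pvN ds)) 0) - (ds.foldl pvStepB (0, 1)).1 :=
      pv_cop_dvd ds hcop _ _ hA_sat hB.2
    rw [hB.1]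
    have hidem : ds.foldl (pvStepA (pvN ds)) 0
        = PySem.Int.mod (ds.foldl (pvStepA (pvN ds)) 0) (pvN ds) := by
      rw [hs]
      show Int.fmod s (pvN ds) = Int.fmod (Int.fmod s (pvN ds)) (pvN ds)
      rw [Int.fmod_fmod]
    rw [hidem]
    exact pv_fmod_eq_of_dvd_sub _ _ _ hd

-- the list-building fold of A produces the two mapped lists
lemma pv_build (f g : Int × (Int × Int) → Int) :
    ∀ (l : List (Int × (Int × Int))) (as bs : List Int),
      l.foldl (fun (acc : List Int × List Int) ip => (acc.1 ++ [f ip], acc.2 ++ [g ip])) (as, bs)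
        = (as ++ l.map f, bs ++ l.map g) := by
  intro l
  induction l with
  | nil => simp
  | cons ip rest ih =>
    intro as bs
    simp only [List.foldl_cons, ih, List.map_cons]
    simp

-- Pre_ transfers to the pair list
lemma pv_pairs_snd_ne (discs : List (Int × Int)) (h : ∀ p ∈ discs, p.1 ≠ 0) :
    ∀ p ∈ pvPairs discs, p.2 ≠ 0 := by
  intro p hp
  obtain ⟨ip, hip, rfl⟩ := List.mem_map.mp hp
  obtain ⟨k, hk, rfl⟩ := (PySem.List.mem_enumerate_iff _ _ _).mp hip
  exact h discs[k] (List.getElem_mem hk)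

lemma pv_pairs_pairwise (discs : List (Int × Int))
    (h : discs.Pairwise (fun p q => Int.gcd p.1 q.1 = 1)) :
    (pvPairs discs).Pairwise (fun p q => Int.gcd p.2 q.2 = 1) := by
  unfold pvPairs
  rw [List.pairwise_map]
  have key : ∀ (l : List (Int × Int)) (st : Int),
      l.Pairwise (fun p q => Int.gcd p.1 q.1 = 1) →
      (PySem.List.enumerate l st).Pairwise (fun a b => Int.gcd a.2.1 b.2.1 = 1) := by
    intro l
    induction l with
    | nil => intro st _; simp [PySem.List.enumerate_nil]
    | cons x tl ih =>
      intro st hl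
      rw [List.pairwise_cons] at hl
      rw [PySem.List.enumerate_cons, List.pairwise_cons]
      refine ⟨?_, ih (st + 1) hl.2⟩
      intro b hb
      obtain ⟨k, hk, rfl⟩ := (PySem.List.mem_enumerate_iff _ _ _).mp hb
      exact hl.1 tl[k] (List.getElem_mem hk)
  exact key discs 0 h

lemma pv_A_eq (discs : List (Int × Int)) :
    when_to_press_the_button discs = (pvPairs discs).foldl (pvStepA (pvN (pvPairs discs))) 0 := by
  unfold when_to_press_the_button crt
  rw [pv_build (fun ip => -(ip.2.2 + ip.1 + 1)) (fun ip => ip.2.1) (PySem.List.enumerate discs) [] []]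
  simp only [List.nil_append, List.zip_map']
  have hN : ((PySem.List.enumerate discs).map (fun ip => ip.2.1)).foldl (fun acc m => acc * m) 1
      = pvN (pvPairs discs) := by
    rw [pvN, pvPairs, List.map_map, ← List.prod_eq_foldl]
    rfl
  rw [hN]
  rfl

lemma pv_B_eq (discs : List (Int × Int)) :
    when_to_press_the_button_alt discs =
      PySem.Int.mod ((pvPairs discs).foldl pvStepB (0, 1)).1 ((pvPairs discs).foldl pvStepB (0, 1)).2 := by
  unfold when_to_press_the_button_alt pvPairs
  rw [List.foldl_map]
  rfl

-- ===== VERDICT (by name: the statement is the Claim_ definition above) =====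
theorem when_to_press_the_button_spec : Claim_equal_when_to_press_the_button := by
  intro discs _ hpre
  unfold Spec_when_to_press_the_button
  rw [pv_A_eq, pv_B_eq]
  exact pv_crt_eq _ (pv_pairs_snd_ne _ hpre.1) (pv_pairs_pairwise _ hpre.2)
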